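-- pv_equiv track=rewrite | github.com/seulki9802/studies | 5-GPS/2-DefineLog.py | remove_back
-- ===== SOURCE A (Python) =====
-- def remove_back(List,char):
--     for i in range(0,len(List)):
--         r=0
--         for cha in List[i]:
--             if cha==char:
--                 List[i]=List[i][:r]
--             r=r+1
--     return List
-- ===== SOURCE B (Python) =====
-- def remove_back(List, char):
--     for i in range(len(List)):
--         kept = []
--         for c in List[i]:
--             if c == char:
--                 break
--             kept.append(c)
--         List[i] = ''.join(kept)
--     return List
-- ===== Notes on version B (the rewrite author's own statement) =====
-- stated objective: simpler
-- what changed: B keeps only the prefix before the first matching character with an early-exit scan (break + join), instead of A's counter-and-repeated-slice scan over the whole string where every later match re-slices a no-op.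
import Mathlib
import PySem

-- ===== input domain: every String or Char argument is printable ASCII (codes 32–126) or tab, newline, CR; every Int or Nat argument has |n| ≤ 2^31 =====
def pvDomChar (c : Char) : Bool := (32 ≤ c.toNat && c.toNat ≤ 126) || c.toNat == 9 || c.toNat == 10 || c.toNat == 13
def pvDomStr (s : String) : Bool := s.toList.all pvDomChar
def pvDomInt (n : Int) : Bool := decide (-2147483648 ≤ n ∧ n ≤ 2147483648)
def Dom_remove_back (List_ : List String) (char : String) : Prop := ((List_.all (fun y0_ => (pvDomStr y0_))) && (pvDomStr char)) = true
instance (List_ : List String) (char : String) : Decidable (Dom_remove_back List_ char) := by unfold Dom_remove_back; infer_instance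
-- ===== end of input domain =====

-- B truncates each string before the first matching character with a single early-exit scan,
-- instead of A's full scan with a position counter and repeated slicing; A mutates List in
-- place (B does too in Python) — the equivalence proved here is about the return value.

-- ===== PORT A =====
-- inner loop body of A: 'if cha==char: List[i]=List[i][:r]; r=r+1' over state (current string, r)
def pvStepA (char : List Char) (st : List Char × Nat) (cha : Char) : List Char × Nat :=
  (if ([cha] : List Char) = char then st.1.take st.2 else st.1, st.2 + 1)

def remove_back (List_ : List String) (char : String) : List String :=
  List_.map (fun s => String.ofList ((s.toList.foldl (pvStepA char.toList) (s.toList, 0)).1))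

-- ===== PORT B =====
-- B's inner loop: collect characters until one equals char, then break
def pvHead (char : List Char) : List Char → List Char
  | [] => []
  | c :: cs => if ([c] : List Char) = char then [] else c :: pvHead char cs

def remove_back_alt (List_ : List String) (char : String) : List String :=
  List_.map (fun s => String.ofList (pvHead char.toList s.toList))

-- ===== PRECONDITION & SPEC =====
def Spec_remove_back (List_ : List String) (char : String) (out : List String) : Prop := out = remove_back_alt List_ char
instance (List_ : List String) (char : String) (out : List String) : Decidable (Spec_remove_back List_ char out) := by unfold Spec_remove_back; infer_instance

-- ===== CLAIM (what is proved, stated in full; the proofs are below) =====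
def Claim_equal_remove_back : Prop := ∀ (List_ : List String) (char : String), Dom_remove_back List_ char → Spec_remove_back List_ char (remove_back List_ char)

-- ===== LEMMAS AND PROOFS =====

-- once the string has been truncated (length ≤ counter), every later slice is a no-op
lemma pvFoldA_of_le (ch : List Char) (cs : List Char) :
    ∀ (cur : List Char) (r : Nat), cur.length ≤ r →
      (cs.foldl (pvStepA ch) (cur, r)).1 = cur := by
  induction cs with
  | nil => intro cur r _; rfl
  | cons c cs ih =>
    intro cur r h
    simp only [List.foldl_cons, pvStepA]
    split_ifs with hc
    · rw [List.take_of_length_le h]; exact ih cur (r + 1) (Nat.le_succ_of_le h)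
    · exact ih cur (r + 1) (Nat.le_succ_of_le h)

-- invariant while no match has been seen: state = (pre ++ rest, pre.length)
lemma pvFoldA_head (ch : List Char) (cs : List Char) :
    ∀ (pre : List Char),
      (cs.foldl (pvStepA ch) (pre ++ cs, pre.length)).1 = pre ++ pvHead ch cs := by
  induction cs with
  | nil => intro pre; simp [pvHead]
  | cons c cs ih =>
    intro pre
    simp only [List.foldl_cons, pvStepA, pvHead]
    split_ifs with hc
    · rw [List.take_left]
      rw [pvFoldA_of_le ch cs pre (pre.length + 1) (Nat.le_succ _)]
      simp
    · have h1 : pre ++ c :: cs = (pre ++ [c]) ++ cs := by simp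
      have h2 : pre.length + 1 = (pre ++ [c]).length := by simp
      rw [h1, h2, ih (pre ++ [c])]
      simp

-- ===== VERDICT (by name: the statement is the Claim_ definition above) =====
theorem remove_back_spec : Claim_equal_remove_back := by
  intro List_ char _
  unfold Spec_remove_back remove_back remove_back_alt
  refine List.map_congr_left (fun s _ => ?_)
  have := pvFoldA_head char.toList s.toList []
  simpa using congrArg String.ofList this
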